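-- pv_equiv track=rewrite | github.com/Elaina10172004/VRP_Agent | local_search/common.py | split_raw_sequence
-- ===== SOURCE A (Python) =====
-- def split_raw_sequence(raw_sequence: list[int]) -> list[list[int]]:
--     routes: list[list[int]] = []
--     current: list[int] = []
--     for node in raw_sequence:
--         if int(node) == 0:
--             if current:
--                 routes.append(current)
--                 current = []
--             continue
--         current.append(int(node) - 1)
--     if current:
--         routes.append(current)
--     return routes
-- ===== SOURCE B (Python) =====
-- def split_raw_sequence(raw_sequence: list[int]) -> list[list[int]]:
--     # Run-scanner: walk maximal runs of equal zero-ness; emit each nonzero run, skip zero runs.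
--     routes: list[list[int]] = []
--     i, n = 0, len(raw_sequence)
--     while i < n:
--         j = i
--         if int(raw_sequence[i]) == 0:
--             while j < n and int(raw_sequence[j]) == 0:
--                 j += 1
--         else:
--             while j < n and int(raw_sequence[j]) != 0:
--                 j += 1
--             routes.append([int(x) - 1 for x in raw_sequence[i:j]])
--         i = j
--     return routes
-- ===== Notes on version B (the rewrite author's own statement) =====
-- stated objective: alternative
-- what changed: Replaces A's element-by-element fold with a flush-on-zero accumulator and trailing flush by a run-scanner that advances over each maximal zero/nonzero run at once, emitting nonzero runs directly and skipping zero runs with no accumulator or flush logic.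
import Mathlib
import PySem

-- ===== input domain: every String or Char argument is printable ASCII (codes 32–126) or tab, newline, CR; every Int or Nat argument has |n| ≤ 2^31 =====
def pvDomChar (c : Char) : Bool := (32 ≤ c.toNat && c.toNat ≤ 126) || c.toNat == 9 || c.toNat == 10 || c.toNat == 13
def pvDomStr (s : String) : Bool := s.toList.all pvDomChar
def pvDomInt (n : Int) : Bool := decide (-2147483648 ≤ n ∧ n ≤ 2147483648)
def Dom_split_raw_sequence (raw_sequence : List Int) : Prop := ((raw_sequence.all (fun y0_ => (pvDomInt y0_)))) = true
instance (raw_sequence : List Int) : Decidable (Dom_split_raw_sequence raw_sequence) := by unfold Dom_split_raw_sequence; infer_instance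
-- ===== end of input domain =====

-- B is an alternative decomposition: instead of A's per-element fold with a flush-on-zero
-- accumulator, B scans maximal zero/nonzero runs, emitting nonzero runs and skipping zero runs.

-- ===== PORT A =====
-- fold over (routes, current); flush current on a zero, append node-1 otherwise; final flush.
def split_raw_sequence (raw_sequence : List Int) : List (List Int) :=
  let st := raw_sequence.foldl
    (fun (s : List (List Int) × List Int) node =>
      if node = 0 then (if s.2 ≠ [] then (s.1 ++ [s.2], ([] : List Int)) else s)
      else (s.1, s.2 ++ [node - 1]))
    ([], [])
  if st.2 ≠ [] then st.1 ++ [st.2] else st.1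

-- ===== PORT B =====
-- run-scanner: each step consumes one maximal run of equal zero-ness (the two inner
-- while-loops of Source B are the takeWhile/dropWhile of the run's predicate).
def splitAltGo (l : List Int) : List (List Int) :=
  match l with
  | [] => []
  | x :: xs =>
    if x = 0 then
      splitAltGo (xs.dropWhile (fun y => y == 0))
    else
      ((x :: xs.takeWhile (fun y => !(y == 0))).map (fun n => n - 1)) ::
        splitAltGo (xs.dropWhile (fun y => !(y == 0)))
termination_by l.length
decreasing_by
  · exact Nat.lt_succ_of_le (xs.length_dropWhile_le _)
  · exact Nat.lt_succ_of_le (xs.length_dropWhile_le _)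

def split_raw_sequence_alt (raw_sequence : List Int) : List (List Int) :=
  splitAltGo raw_sequence

-- ===== PRECONDITION & SPEC =====
def Spec_split_raw_sequence (raw_sequence : List Int) (out : List (List Int)) : Prop := out = split_raw_sequence_alt raw_sequence
instance (raw_sequence : List Int) (out : List (List Int)) : Decidable (Spec_split_raw_sequence raw_sequence out) := by unfold Spec_split_raw_sequence; infer_instance

-- ===== CLAIM (what is proved, stated in full; the proofs are below) =====
def Claim_equal_split_raw_sequence : Prop := ∀ (raw_sequence : List Int), Dom_split_raw_sequence raw_sequence → Spec_split_raw_sequence raw_sequence (split_raw_sequence raw_sequence)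

-- ===== LEMMAS AND PROOFS =====

-- canonical recursive splitter, parameterised by the (already decremented) open run
def fspec : List Int → List Int → List (List Int)
  | [], cur => if cur = [] then [] else [cur]
  | x :: xs, cur =>
    if x = 0 then (if cur = [] then fspec xs [] else cur :: fspec xs [])
    else fspec xs (cur ++ [x - 1])

theorem foldA_eq_fspec (l : List Int) :
    ∀ (routes : List (List Int)) (cur : List Int),
    (let st := l.foldl
        (fun (s : List (List Int) × List Int) node =>
          if node = 0 then (if s.2 ≠ [] then (s.1 ++ [s.2], ([] : List Int)) else s)
          else (s.1, s.2 ++ [node - 1]))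
        (routes, cur)
     if st.2 ≠ [] then st.1 ++ [st.2] else st.1) = routes ++ fspec l cur := by
  induction l with
  | nil =>
    intro routes cur
    simp only [List.foldl_nil, fspec]
    by_cases h : cur = [] <;> simp [h]
  | cons x xs ih =>
    intro routes cur
    simp only [List.foldl_cons, fspec]
    by_cases hx : x = 0
    · by_cases hc : cur = []
      · simpa [hx, hc] using ih routes []
      · simpa [hx, hc, List.append_assoc] using ih (routes ++ [cur]) []
    · simpa [hx] using ih routes (cur ++ [x - 1])

theorem fspec_zeros (z : List Int) (hz : ∀ y ∈ z, y = 0) (rest : List Int) :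
    fspec (z ++ rest) [] = fspec rest [] := by
  induction z with
  | nil => rfl
  | cons y ys ih =>
    have hy : y = 0 := hz y (by simp)
    simp only [List.cons_append, fspec, hy]
    exact ih (fun a ha => hz a (by simp [ha]))

theorem fspec_nonzeros (r : List Int) (hr : ∀ y ∈ r, y ≠ 0) :
    ∀ (rest cur : List Int),
    fspec (r ++ rest) cur = fspec rest (cur ++ r.map (fun n => n - 1)) := by
  induction r with
  | nil => intro rest cur; simp
  | cons y ys ih =>
    intro rest cur
    have hy : y ≠ 0 := hr y (by simp)
    simp only [List.cons_append, fspec, if_neg hy, List.map_cons]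
    rw [ih (fun a ha => hr a (by simp [ha])) rest (cur ++ [y - 1])]
    simp

theorem altGo_eq_fspec : ∀ (n : ℕ) (l : List Int), l.length ≤ n → splitAltGo l = fspec l [] := by
  intro n
  induction n with
  | zero =>
    intro l hl
    have : l = [] := List.eq_nil_of_length_eq_zero (Nat.le_zero.mp hl)
    simp [this, splitAltGo, fspec]
  | succ n ih =>
    intro l hl
    match l with
    | [] => simp [splitAltGo, fspec]
    | x :: xs =>
      by_cases hx : x = 0
      · -- zero run skipped
        rw [splitAltGo]
        simp only [if_pos hx]
        have hsplit : xs = xs.takeWhile (fun y => y == 0) ++ xs.dropWhile (fun y => y == 0) :=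
          (List.takeWhile_append_dropWhile).symm
        have hz : ∀ y ∈ (x :: xs.takeWhile (fun y => y == 0)), y = 0 := by
          intro y hy
          rcases List.mem_cons.mp hy with h | h
          · simpa [h] using hx
          · have := List.mem_takeWhile_imp h
            simpa using this
        have hlen : (xs.dropWhile (fun y => y == 0)).length ≤ n := by
          have := xs.length_dropWhile_le (fun y => y == 0)
          simp only [List.length_cons] at hl; omega
        rw [ih _ hlen]
        have : fspec (x :: xs) [] = fspec (xs.dropWhile (fun y => y == 0)) [] := by
          conv_lhs => rw [show x :: xs = (x :: xs.takeWhile (fun y => y == 0)) ++ xs.dropWhile (fun y => y == 0) by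
            simp only [List.cons_append]; rw [← hsplit]]
          exact fspec_zeros _ hz _
        rw [this]
      · -- nonzero run emitted
        rw [splitAltGo]
        simp only [if_neg hx]
        have hsplit : xs = xs.takeWhile (fun y => !(y == 0)) ++ xs.dropWhile (fun y => !(y == 0)) :=
          (List.takeWhile_append_dropWhile).symm
        set r := x :: xs.takeWhile (fun y => !(y == 0)) with hr
        set rest := xs.dropWhile (fun y => !(y == 0)) with hrest
        have hnz : ∀ y ∈ r, y ≠ 0 := by
          intro y hy
          rcases List.mem_cons.mp hy with h | h
          · simpa [h] using hx
          · have := List.mem_takeWhile_imp h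
            simpa using this
        have hlx : x :: xs = r ++ rest := by
          simp only [hr, List.cons_append]; rw [← hsplit]
        have hlen : rest.length ≤ n := by
          have := xs.length_dropWhile_le (fun y => !(y == 0))
          simp only [List.length_cons] at hl
          simp only [hrest]; omega
        rw [ih _ hlen]
        rw [hlx, fspec_nonzeros r hnz rest []]
        -- rest is empty or starts with a zero
        match hrest2 : rest with
        | [] =>
          simp [fspec, hr]
        | z :: zs =>
          have hz0 : z = 0 := by
            have := List.head?_dropWhile_not (fun y => !(y == 0)) xs
            rw [← hrest] at this
            simpa using this
          simp only [fspec, if_pos hz0, List.nil_append]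
          simp

-- ===== VERDICT (by name: the statement is the Claim_ definition above) =====
theorem split_raw_sequence_spec : Claim_equal_split_raw_sequence := by
  intro l _
  unfold Spec_split_raw_sequence split_raw_sequence split_raw_sequence_alt
  rw [altGo_eq_fspec l.length l (le_refl _)]
  simpa using foldA_eq_fspec l [] []
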